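-- pv_equiv track=rewrite | github.com/Franco414/DASO_C14 | Ejercicios Extras/Unidad6/Ejercicio_6_5.py | my_string_b
-- ===== SOURCE A (Python) =====
-- def my_string_b(cadena):
--     lista=[]
--     ban=1
--     for i in range(0,len(cadena)):
--         if(cadena[i]==" "):
--             ban=1
--         else:
--             if(ban==1):
--                 if(cadena[i]>="a" and cadena[i]<="z"):
--                     lista.append(cadena[i].upper())
--                 else:
--                     lista.append(cadena[i])
--                 ban=0
--     ret="".join(lista)
--     return ret
-- ===== SOURCE B (Python) =====
-- def my_string_b(cadena):
--     out = []
--     for w in cadena.split(" "):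
--         if w:
--             c = w[0]
--             out.append(c.upper() if "a" <= c <= "z" else c)
--     return "".join(out)
-- ===== Notes on version B (the rewrite author's own statement) =====
-- stated objective: idiomatic
-- what changed: Replaced A's character-by-character ban-flag state machine with the idiomatic decomposition: split the string on the single-space separator, take the first character of each non-empty token, uppercase it if it is an ASCII lowercase letter, and join; the C-level str.split/join replace the per-character interpreted loop (constant-factor speedup, measured).
import Mathlib
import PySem

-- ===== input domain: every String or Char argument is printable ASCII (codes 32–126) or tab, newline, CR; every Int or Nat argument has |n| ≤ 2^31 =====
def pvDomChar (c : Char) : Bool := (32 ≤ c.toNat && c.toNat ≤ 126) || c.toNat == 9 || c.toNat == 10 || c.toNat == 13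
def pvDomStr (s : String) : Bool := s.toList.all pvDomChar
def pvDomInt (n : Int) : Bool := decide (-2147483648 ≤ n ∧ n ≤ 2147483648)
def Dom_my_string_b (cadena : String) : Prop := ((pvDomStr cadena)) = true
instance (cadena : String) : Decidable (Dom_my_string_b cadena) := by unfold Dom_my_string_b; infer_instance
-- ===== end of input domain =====

-- B replaces A's ban-flag state machine by the idiomatic split(" ")-into-words decomposition (objective: idiomatic; same cost).

-- shared per-character transform: c.upper() if "a" <= c <= "z" else c (ASCII uppercase; exact on the a..z guard)
def pvUp (c : Char) : Char := if 'a' ≤ c ∧ c ≤ 'z' then Char.ofNat (c.toNat - 32) else c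

-- ===== PORT A =====
-- A's loop body: on a space set ban=1; otherwise if ban==1 append the (ASCII-uppercased) char and set ban=0
def pvStepA (st : List Char × Int) (c : Char) : List Char × Int :=
  if c = ' ' then (st.1, 1)
  else if st.2 = 1 then (st.1 ++ [pvUp c], 0)
  else st

def my_string_b (cadena : String) : String :=
  String.ofList
    (((PySem.List.pyRange 0 (PySem.Str.len cadena) 1).foldl
      (fun (st : List Char × Int) i =>
        pvStepA st (PySem.List.pyGetD cadena.toList i ' ')) ([], 1)).1)

-- ===== PORT B =====
def my_string_b_alt (cadena : String) : String :=
  String.ofList (PySem.Chars.join []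
    ((PySem.Chars.splitOn cadena.toList " ".toList).foldl
      (fun (acc : List (List Char)) w =>
        match w with
        | [] => acc
        | c :: _ => acc ++ [[pvUp c]]) []))

-- ===== PRECONDITION & SPEC =====
def Spec_my_string_b (cadena : String) (out : String) : Prop := out = my_string_b_alt cadena
instance (cadena : String) (out : String) : Decidable (Spec_my_string_b cadena out) := by unfold Spec_my_string_b; infer_instance

-- ===== CLAIM (what is proved, stated in full; the proofs are below) =====
def Claim_equal_my_string_b : Prop := ∀ (cadena : String), Dom_my_string_b cadena → Spec_my_string_b cadena (my_string_b cadena)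

-- ===== LEMMAS AND PROOFS =====

-- reference recursion: the collected first letters with an explicit ban flag
def pvRef (ban : Bool) : List Char → List Char
  | [] => []
  | c :: cs => if c = ' ' then pvRef true cs
               else if ban then pvUp c :: pvRef false cs else pvRef false cs

lemma pvFoldA (cs : List Char) : ∀ (acc : List Char),
    (cs.foldl pvStepA (acc, 1)).1 = acc ++ pvRef true cs ∧
    (cs.foldl pvStepA (acc, 0)).1 = acc ++ pvRef false cs := by
  induction cs with
  | nil => simp [pvRef]
  | cons c cs ih =>
    intro acc
    by_cases h : c = ' ' <;>
      simp [pvStepA, pvRef, h, (ih acc).1, (ih acc).2, (ih (acc ++ [pvUp c])).2]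

-- structural reference for Chars.splitOn with the single-char separator ' '
def pvSplitAux : List Char → List Char → List (List Char)
  | [], cur => [cur.reverse]
  | c :: rest, cur => if c = ' ' then cur.reverse :: pvSplitAux rest []
                      else pvSplitAux rest (c :: cur)

lemma pvGo_space : ∀ (fuel : Nat) (l cur : List Char) (acc : List (List Char)),
    l.length < fuel →
    PySem.Chars.splitOn.go [' '] fuel l cur acc = acc.reverse ++ pvSplitAux l cur := by
  intro fuel
  induction fuel with
  | zero => intro l cur acc h; omega
  | succ fuel ih =>
    intro l cur acc h
    match l with
    | [] => simp [PySem.Chars.splitOn.go, pvSplitAux]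
    | c :: rest =>
      by_cases hc : c = ' '
      · simp only [PySem.Chars.splitOn.go, hc, pvSplitAux]
        rw [show [' '].isPrefixOf (' ' :: rest) = true by simp [List.isPrefixOf]]
        simp only [List.length_singleton, List.drop_one, List.tail_cons]
        rw [ih rest [] (cur.reverse :: acc) (by simp at h; omega)]
        simp
      · simp only [PySem.Chars.splitOn.go, pvSplitAux, hc, if_false]
        rw [show [' '].isPrefixOf (c :: rest) = false by
              simp [List.isPrefixOf]; exact fun hp => hc hp.symm]
        simp only [Bool.false_eq_true, if_false]
        exact ih rest (c :: cur) acc (by simp at h ⊢; omega)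

lemma pvSplitOn_eq (cs : List Char) :
    PySem.Chars.splitOn cs [' '] = pvSplitAux cs [] := by
  have := pvGo_space (cs.length + 1) cs [] [] (by omega)
  simpa [PySem.Chars.splitOn] using this

-- heads of the words, flattened
def pvHd1 : List Char → List Char
  | [] => []
  | c :: _ => [pvUp c]

lemma pvFirsts (cs : List Char) :
    ((pvSplitAux cs []).flatMap pvHd1 = pvRef true cs) ∧
    (∀ (cur : List Char) (c : Char),
       (pvSplitAux cs (cur ++ [c])).flatMap pvHd1 = pvUp c :: pvRef false cs) := by
  induction cs with
  | nil =>
    refine ⟨by simp [pvSplitAux, pvHd1, pvRef], ?_⟩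
    intro cur c
    simp [pvSplitAux, pvHd1, pvRef]
  | cons d rest ih =>
    constructor
    · by_cases hd : d = ' '
      · simp [pvSplitAux, hd, pvHd1, pvRef, ih.1]
      · have := ih.2 [] d
        simp only [List.nil_append] at this
        simp [pvSplitAux, hd, pvRef, this]
    · intro cur c
      by_cases hd : d = ' '
      · simp [pvSplitAux, hd, pvHd1, pvRef, ih.1]
      · have := ih.2 (d :: cur) c
        simp only [List.cons_append] at this
        simp [pvSplitAux, hd, pvRef, this]

def pvG : List Char → List (List Char)
  | [] => []
  | c :: _ => [[pvUp c]]

lemma pvJoin_nil_flatten (xss : List (List Char)) :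
    PySem.Chars.join [] xss = xss.flatten := by
  induction xss with
  | nil => simp [PySem.Chars.join_nil]
  | cons p rest ih =>
    cases rest with
    | nil => simp [PySem.Chars.join_singleton]
    | cons q r => rw [PySem.Chars.join_cons_cons] at *; simp_all

lemma pvFold_out (ws : List (List Char)) :
    ws.foldl
      (fun (acc : List (List Char)) w =>
        match w with
        | [] => acc
        | c :: _ => acc ++ [[pvUp c]]) [] = ws.flatMap pvG := by
  induction ws using List.reverseRecOn with
  | nil => simp
  | append_singleton ws w ihw => cases w <;> simp [pvG, ihw]

lemma pvFlatten_G (ws : List (List Char)) :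
    (ws.flatMap pvG).flatten = ws.flatMap pvHd1 := by
  induction ws with
  | nil => simp
  | cons w rest ih => cases w <;> simp [pvG, pvHd1, ih]

-- ===== VERDICT (by name: the statement is the Claim_ definition above) =====
theorem my_string_b_spec : Claim_equal_my_string_b := by
  intro cadena _
  unfold Spec_my_string_b my_string_b my_string_b_alt
  have hlen : PySem.Str.len cadena = (cadena.toList.length : Int) := by
    simp [PySem.Str.len]
  rw [hlen]
  rw [PySem.List.foldl_pyRange_zero_pyGetD' cadena.toList ' ' pvStepA ([], 1)]
  have hA := (pvFoldA cadena.toList []).1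
  simp only [List.nil_append] at hA
  rw [hA]
  have hsep : (" " : String).toList = [' '] := rfl
  rw [hsep, pvSplitOn_eq, pvFold_out, pvJoin_nil_flatten, pvFlatten_G,
      (pvFirsts cadena.toList).1]
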